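-- pv_equiv track=rewrite | github.com/tanasiecristinel1975-wq/mehedintiazi | ACTUALIZEAZA-BREAKING-NEWS.py | genereaza_ticker
-- ===== SOURCE A (Python) =====
-- NR_STIRI = 10
--
-- def get_icon(filename, titlu):
--     fn = filename.lower()
--     if any(x in fn for x in ["accident", "crash", "victime"]):
--         return "&#128680; ACCIDENT &mdash;"
--     elif any(x in fn for x in ["incendiu", "foc", "flacarai", "ars", "flacari"]):
--         return "&#128293; INCENDIU &mdash;"
--     elif any(x in fn for x in ["arestat", "retinut", "viol", "furt", "droguri",
--                                  "tanar-prins", "substante", "abuz", "crima"]):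
--         return "&#128680; RETINUT &mdash;"
--     elif any(x in fn for x in ["liga", "cs-drobeta", "sahisti", "meci",
--                                  "clasament", "fotbal", "sport"]):
--         return "&#9917; SPORT &mdash;"
--     elif any(x in fn for x in ["cod-galben", "cod-rosu", "cutremur", "vant",
--                                  "inundatii", "ninsoare", "meteo"]):
--         return "&#9888; ATENTIONARE &mdash;"
--     elif any(x in fn for x in ["tragedie", "decedat", "mort", "deces"]):
--         return "&#128293; TRAGEDIE &mdash;"
--     elif any(x in fn for x in ["umanitar", "apel", "ajutor"]):
--         return "&#10084; UMANITAR &mdash;"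
--     elif any(x in fn for x in ["horoscop"]):
--         return "&#10024; HOROSCOP &mdash;"
--     else:
--         return "&#128240;"
--
-- def genereaza_ticker(articole):
--     stiri = articole[:NR_STIRI]
--     linii = []
--
--     for _, fisier, titlu in stiri:
--         icon = get_icon(fisier, titlu)
--         titlu_html = titlu.replace("&", "&amp;").replace('"', "&quot;")
--         linii.append(f'          <a href="{fisier}">{icon} {titlu_html}</a>')
--
--     # Dubleaza stirile pentru scroll continuu fara pauze
--     linii_finale = linii + linii
--
--     return "\n".join(linii_finale)
-- ===== SOURCE B (Python) =====
-- NR_STIRI = 10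
--
-- # Flat keyword index: each keyword maps to (priority, icon); the icon shown is the
-- # one of the minimum-priority keyword found in the filename.
-- KEYWORD_ICON = {
--     "accident": (0, "&#128680; ACCIDENT &mdash;"),
--     "crash": (0, "&#128680; ACCIDENT &mdash;"),
--     "victime": (0, "&#128680; ACCIDENT &mdash;"),
--     "incendiu": (1, "&#128293; INCENDIU &mdash;"),
--     "foc": (1, "&#128293; INCENDIU &mdash;"),
--     "flacarai": (1, "&#128293; INCENDIU &mdash;"),
--     "ars": (1, "&#128293; INCENDIU &mdash;"),
--     "flacari": (1, "&#128293; INCENDIU &mdash;"),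
--     "arestat": (2, "&#128680; RETINUT &mdash;"),
--     "retinut": (2, "&#128680; RETINUT &mdash;"),
--     "viol": (2, "&#128680; RETINUT &mdash;"),
--     "furt": (2, "&#128680; RETINUT &mdash;"),
--     "droguri": (2, "&#128680; RETINUT &mdash;"),
--     "tanar-prins": (2, "&#128680; RETINUT &mdash;"),
--     "substante": (2, "&#128680; RETINUT &mdash;"),
--     "abuz": (2, "&#128680; RETINUT &mdash;"),
--     "crima": (2, "&#128680; RETINUT &mdash;"),
--     "liga": (3, "&#9917; SPORT &mdash;"),
--     "cs-drobeta": (3, "&#9917; SPORT &mdash;"),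
--     "sahisti": (3, "&#9917; SPORT &mdash;"),
--     "meci": (3, "&#9917; SPORT &mdash;"),
--     "clasament": (3, "&#9917; SPORT &mdash;"),
--     "fotbal": (3, "&#9917; SPORT &mdash;"),
--     "sport": (3, "&#9917; SPORT &mdash;"),
--     "cod-galben": (4, "&#9888; ATENTIONARE &mdash;"),
--     "cod-rosu": (4, "&#9888; ATENTIONARE &mdash;"),
--     "cutremur": (4, "&#9888; ATENTIONARE &mdash;"),
--     "vant": (4, "&#9888; ATENTIONARE &mdash;"),
--     "inundatii": (4, "&#9888; ATENTIONARE &mdash;"),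
--     "ninsoare": (4, "&#9888; ATENTIONARE &mdash;"),
--     "meteo": (4, "&#9888; ATENTIONARE &mdash;"),
--     "tragedie": (5, "&#128293; TRAGEDIE &mdash;"),
--     "decedat": (5, "&#128293; TRAGEDIE &mdash;"),
--     "mort": (5, "&#128293; TRAGEDIE &mdash;"),
--     "deces": (5, "&#128293; TRAGEDIE &mdash;"),
--     "umanitar": (6, "&#10084; UMANITAR &mdash;"),
--     "apel": (6, "&#10084; UMANITAR &mdash;"),
--     "ajutor": (6, "&#10084; UMANITAR &mdash;"),
--     "horoscop": (7, "&#10024; HOROSCOP &mdash;"),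
-- }
--
-- def _icon(filename):
--     fn = filename.lower()
--     found = [v for kw, v in KEYWORD_ICON.items() if kw in fn]
--     if not found:
--         return "&#128240;"
--     _, icon = min(found, key=lambda v: v[0])
--     return icon
--
-- def genereaza_ticker(articole):
--     n = min(len(articole), NR_STIRI)
--     linii = []
--     for i in range(2 * n):
--         _, fisier, titlu = articole[i % n]
--         titlu_html = titlu.replace("&", "&amp;").replace('"', "&quot;")
--         linii.append(f'          <a href="{fisier}">{_icon(fisier)} {titlu_html}</a>')
--     return "\n".join(linii)
-- ===== Notes on version B (the rewrite author's own statement) =====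
-- stated objective: alternative
-- what changed: The if/elif group cascade becomes a flat keyword->(priority,icon) index: B collects every matching keyword's entry and takes the minimum-priority one (default icon if none); the slice+append+linii+linii doubling becomes a single loop over range(2*n) indexing articole[i % n].
import Mathlib
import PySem

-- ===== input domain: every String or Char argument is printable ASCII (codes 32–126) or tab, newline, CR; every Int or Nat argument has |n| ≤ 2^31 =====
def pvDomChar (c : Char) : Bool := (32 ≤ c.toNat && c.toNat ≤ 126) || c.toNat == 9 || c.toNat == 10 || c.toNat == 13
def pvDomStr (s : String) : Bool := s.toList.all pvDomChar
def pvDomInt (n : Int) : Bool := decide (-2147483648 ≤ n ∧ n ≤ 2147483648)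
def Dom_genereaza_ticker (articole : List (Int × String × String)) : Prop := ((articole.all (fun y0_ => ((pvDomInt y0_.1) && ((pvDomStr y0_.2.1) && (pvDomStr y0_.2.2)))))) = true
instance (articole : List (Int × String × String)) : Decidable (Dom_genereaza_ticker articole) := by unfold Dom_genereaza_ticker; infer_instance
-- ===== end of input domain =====

-- B replaces A's if/elif icon cascade by a min-priority lookup in a flat keyword index, and replaces
-- slice + append-loop + linii+linii doubling by one modular-index loop over range(2n) (alternative; same cost).

-- ===== PORT A =====
def get_icon (filename : String) (_titlu : String) : String :=
  let fn := PySem.Str.lower filename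
  if ["accident", "crash", "victime"].any (fun x => PySem.Str.isIn x fn) then
    "&#128680; ACCIDENT &mdash;"
  else if ["incendiu", "foc", "flacarai", "ars", "flacari"].any (fun x => PySem.Str.isIn x fn) then
    "&#128293; INCENDIU &mdash;"
  else if ["arestat", "retinut", "viol", "furt", "droguri",
           "tanar-prins", "substante", "abuz", "crima"].any (fun x => PySem.Str.isIn x fn) then
    "&#128680; RETINUT &mdash;"
  else if ["liga", "cs-drobeta", "sahisti", "meci",
           "clasament", "fotbal", "sport"].any (fun x => PySem.Str.isIn x fn) then
    "&#9917; SPORT &mdash;"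
  else if ["cod-galben", "cod-rosu", "cutremur", "vant",
           "inundatii", "ninsoare", "meteo"].any (fun x => PySem.Str.isIn x fn) then
    "&#9888; ATENTIONARE &mdash;"
  else if ["tragedie", "decedat", "mort", "deces"].any (fun x => PySem.Str.isIn x fn) then
    "&#128293; TRAGEDIE &mdash;"
  else if ["umanitar", "apel", "ajutor"].any (fun x => PySem.Str.isIn x fn) then
    "&#10084; UMANITAR &mdash;"
  else if ["horoscop"].any (fun x => PySem.Str.isIn x fn) then
    "&#10024; HOROSCOP &mdash;"
  else
    "&#128240;"

def genereaza_ticker (articole : List (Int × String × String)) : String :=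
  let stiri := PySem.List.slice articole none (some (10 : Int))
  let linii := stiri.foldl (fun acc p =>
    let fisier := p.2.1
    let titlu := p.2.2
    let icon := get_icon fisier titlu
    let titlu_html := PySem.Str.replace (PySem.Str.replace titlu "&" "&amp;") "\"" "&quot;"
    acc ++ ["          <a href=\"" ++ fisier ++ "\">" ++ icon ++ " " ++ titlu_html ++ "</a>"]) []
  let linii_finale := linii ++ linii
  PySem.Str.join "\n" linii_finale

-- ===== PORT B =====
-- the dict KEYWORD_ICON of Source B as an association list in insertion order
def KEYWORD_ICON : List (String × Int × String) :=
  [ ("accident", 0, "&#128680; ACCIDENT &mdash;"),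
    ("crash", 0, "&#128680; ACCIDENT &mdash;"),
    ("victime", 0, "&#128680; ACCIDENT &mdash;"),
    ("incendiu", 1, "&#128293; INCENDIU &mdash;"),
    ("foc", 1, "&#128293; INCENDIU &mdash;"),
    ("flacarai", 1, "&#128293; INCENDIU &mdash;"),
    ("ars", 1, "&#128293; INCENDIU &mdash;"),
    ("flacari", 1, "&#128293; INCENDIU &mdash;"),
    ("arestat", 2, "&#128680; RETINUT &mdash;"),
    ("retinut", 2, "&#128680; RETINUT &mdash;"),
    ("viol", 2, "&#128680; RETINUT &mdash;"),
    ("furt", 2, "&#128680; RETINUT &mdash;"),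
    ("droguri", 2, "&#128680; RETINUT &mdash;"),
    ("tanar-prins", 2, "&#128680; RETINUT &mdash;"),
    ("substante", 2, "&#128680; RETINUT &mdash;"),
    ("abuz", 2, "&#128680; RETINUT &mdash;"),
    ("crima", 2, "&#128680; RETINUT &mdash;"),
    ("liga", 3, "&#9917; SPORT &mdash;"),
    ("cs-drobeta", 3, "&#9917; SPORT &mdash;"),
    ("sahisti", 3, "&#9917; SPORT &mdash;"),
    ("meci", 3, "&#9917; SPORT &mdash;"),
    ("clasament", 3, "&#9917; SPORT &mdash;"),
    ("fotbal", 3, "&#9917; SPORT &mdash;"),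
    ("sport", 3, "&#9917; SPORT &mdash;"),
    ("cod-galben", 4, "&#9888; ATENTIONARE &mdash;"),
    ("cod-rosu", 4, "&#9888; ATENTIONARE &mdash;"),
    ("cutremur", 4, "&#9888; ATENTIONARE &mdash;"),
    ("vant", 4, "&#9888; ATENTIONARE &mdash;"),
    ("inundatii", 4, "&#9888; ATENTIONARE &mdash;"),
    ("ninsoare", 4, "&#9888; ATENTIONARE &mdash;"),
    ("meteo", 4, "&#9888; ATENTIONARE &mdash;"),
    ("tragedie", 5, "&#128293; TRAGEDIE &mdash;"),
    ("decedat", 5, "&#128293; TRAGEDIE &mdash;"),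
    ("mort", 5, "&#128293; TRAGEDIE &mdash;"),
    ("deces", 5, "&#128293; TRAGEDIE &mdash;"),
    ("umanitar", 6, "&#10084; UMANITAR &mdash;"),
    ("apel", 6, "&#10084; UMANITAR &mdash;"),
    ("ajutor", 6, "&#10084; UMANITAR &mdash;"),
    ("horoscop", 7, "&#10024; HOROSCOP &mdash;") ]

def icon_alt (filename : String) : String :=
  let fn := PySem.Str.lower filename
  let found := KEYWORD_ICON.filterMap (fun p => if PySem.Str.isIn p.1 fn then some p.2 else none)
  match PySem.List.min? found (fun v => v.1) with
  | none => "&#128240;"          -- 'if not found'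
  | some v => v.2                -- min(found, key=lambda v: v[0])[1]

def genereaza_ticker_alt (articole : List (Int × String × String)) : String :=
  let n : Int := min (articole.length : Int) 10
  let linii := (PySem.List.pyRange 0 (2 * n) 1).foldl (fun acc i =>
    let p := PySem.List.pyGetD articole (PySem.Int.mod i n) (0, "", "")
    let fisier := p.2.1
    let titlu := p.2.2
    let titlu_html := PySem.Str.replace (PySem.Str.replace titlu "&" "&amp;") "\"" "&quot;"
    acc ++ ["          <a href=\"" ++ fisier ++ "\">" ++ icon_alt fisier ++ " " ++ titlu_html ++ "</a>"]) []
  PySem.Str.join "\n" linii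

-- ===== PRECONDITION & SPEC =====
def Spec_genereaza_ticker (articole : List (Int × String × String)) (out : String) : Prop := out = genereaza_ticker_alt articole
instance (articole : List (Int × String × String)) (out : String) : Decidable (Spec_genereaza_ticker articole out) := by unfold Spec_genereaza_ticker; infer_instance

-- ===== CLAIM (what is proved, stated in full; the proofs are below) =====
def Claim_equal_genereaza_ticker : Prop := ∀ (articole : List (Int × String × String)), Dom_genereaza_ticker articole → Spec_genereaza_ticker articole (genereaza_ticker articole)

-- ===== LEMMAS AND PROOFS =====

-- filtering a constant-valued keyword group yields a replicate of its value
theorem fm_const {α β : Type} (P : α → Bool) (c : β) (ks : List α) :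
    ks.filterMap (fun k => if P k then some c else none) = List.replicate (ks.countP P) c := by
  induction ks with
  | nil => rfl
  | cons k t ih => by_cases h : P k <;> simp [h, ih, List.replicate_succ]

theorem eq_of_mem_fm {α β : Type} {P : α → Bool} {c y : β} {ks : List α}
    (h : y ∈ ks.filterMap (fun k => if P k then some c else none)) : y = c := by
  rw [fm_const] at h; exact List.eq_of_mem_replicate h

-- the running-min fold is absorbed by an element no later element beats
theorem foldl_min_absorb {α : Type} (key : α → Int) (c : α) (l : List α)
    (h : ∀ y ∈ l, ¬ key y < key c) :
    l.foldl (fun acc x =>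
      match acc with
      | none => some x
      | some m => if key x < key m then some x else some m) (some c) = some c := by
  induction l with
  | nil => rfl
  | cons y t ih =>
    have hy := h y (by simp)
    simp only [List.foldl, hy]
    exact ih (fun z hz => h z (by simp [hz]))

-- first-min of a constant group followed by strictly-larger keys
theorem min?_rep_append {α : Type} (key : α → Int) (c : α) (n : Nat) (R : List α)
    (hR : ∀ y ∈ R, key c < key y) :
    PySem.List.min? (List.replicate n c ++ R) key
      = if n = 0 then PySem.List.min? R key else some c := by
  cases n with
  | zero => simp
  | succ m =>
    simp only [Nat.succ_ne_zero, if_neg, not_false_iff]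
    show PySem.List.min? (c :: (List.replicate m c ++ R)) key = some c
    unfold PySem.List.min?
    simp only [List.foldl_cons]
    exact foldl_min_absorb key c _ (by
      intro y hy
      rcases List.mem_append.mp hy with h | h
      · rw [List.eq_of_mem_replicate h]; omega
      · exact not_lt.mpr (le_of_lt (hR y h)))

-- one cascade stage: a filtered keyword group in front behaves like its if/elif branch
theorem min?_group {α : Type} (key : α → Int) (P : String → Bool) (c : α)
    (ks : List String) (R : List α) (hR : ∀ y ∈ R, key c < key y) :
    PySem.List.min? (ks.filterMap (fun k => if P k then some c else none) ++ R) key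
      = if ks.any P then some c else PySem.List.min? R key := by
  rw [fm_const, min?_rep_append key c _ R hR]
  rcases Nat.eq_zero_or_pos (ks.countP P) with h | h
  · have hany : ks.any P = false := by
      rw [List.any_eq_false]; intro x hx
      by_contra hb
      have := List.countP_pos_iff.mpr ⟨x, hx, by simpa using hb⟩
      omega
    simp [h, hany]
  · have hany : ks.any P = true := by
      rw [List.any_eq_true]
      obtain ⟨x, hx, hPx⟩ := List.countP_pos_iff.mp h
      exact ⟨x, hx, by simpa using hPx⟩
    simp [Nat.pos_iff_ne_zero.mp h, hany]

-- min-priority over the flat keyword index = A's if/elif cascade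
set_option maxHeartbeats 1000000 in
theorem icon_alt_eq (f t : String) : icon_alt f = get_icon f t := by
  simp only [icon_alt, get_icon]
  set fn := PySem.Str.lower f with hfn
  set P : String → Bool := fun k => PySem.Str.isIn k fn with hP
  have hK : KEYWORD_ICON
      = (["accident", "crash", "victime"].map (fun k => (k, ((0:Int), "&#128680; ACCIDENT &mdash;"))))
      ++ ((["incendiu", "foc", "flacarai", "ars", "flacari"].map (fun k => (k, ((1:Int), "&#128293; INCENDIU &mdash;"))))
      ++ ((["arestat", "retinut", "viol", "furt", "droguri", "tanar-prins", "substante", "abuz", "crima"].map (fun k => (k, ((2:Int), "&#128680; RETINUT &mdash;"))))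
      ++ ((["liga", "cs-drobeta", "sahisti", "meci", "clasament", "fotbal", "sport"].map (fun k => (k, ((3:Int), "&#9917; SPORT &mdash;"))))
      ++ ((["cod-galben", "cod-rosu", "cutremur", "vant", "inundatii", "ninsoare", "meteo"].map (fun k => (k, ((4:Int), "&#9888; ATENTIONARE &mdash;"))))
      ++ ((["tragedie", "decedat", "mort", "deces"].map (fun k => (k, ((5:Int), "&#128293; TRAGEDIE &mdash;"))))
      ++ ((["umanitar", "apel", "ajutor"].map (fun k => (k, ((6:Int), "&#10084; UMANITAR &mdash;"))))
      ++ (["horoscop"].map (fun k => (k, ((7:Int), "&#10024; HOROSCOP &mdash;")))))))))) := by rfl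
  rw [hK]
  simp only [List.filterMap_append, List.filterMap_map, Function.comp_def]
  rw [min?_group _ P _ _ _ (by
        intro y hy
        simp only [List.mem_append] at hy
        rcases hy with h|h|h|h|h|h|h <;> (cases eq_of_mem_fm h; norm_num))]
  rw [min?_group _ P _ _ _ (by
        intro y hy
        simp only [List.mem_append] at hy
        rcases hy with h|h|h|h|h|h <;> (cases eq_of_mem_fm h; norm_num))]
  rw [min?_group _ P _ _ _ (by
        intro y hy
        simp only [List.mem_append] at hy
        rcases hy with h|h|h|h|h <;> (cases eq_of_mem_fm h; norm_num))]
  rw [min?_group _ P _ _ _ (by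
        intro y hy
        simp only [List.mem_append] at hy
        rcases hy with h|h|h|h <;> (cases eq_of_mem_fm h; norm_num))]
  rw [min?_group _ P _ _ _ (by
        intro y hy
        simp only [List.mem_append] at hy
        rcases hy with h|h|h <;> (cases eq_of_mem_fm h; norm_num))]
  rw [min?_group _ P _ _ _ (by
        intro y hy
        simp only [List.mem_append] at hy
        rcases hy with h|h <;> (cases eq_of_mem_fm h; norm_num))]
  rw [min?_group _ P _ _ _ (by
        intro y hy
        cases eq_of_mem_fm hy; norm_num)]
  have hlast : PySem.List.min?
      (["horoscop"].filterMap (fun k => if P k then some (((7:Int), "&#10024; HOROSCOP &mdash;")) else none))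
      (fun v : Int × String => v.1)
      = if ["horoscop"].any P then some (((7:Int), "&#10024; HOROSCOP &mdash;")) else none := by
    have h := min?_group (fun v : Int × String => v.1) P (((7:Int), "&#10024; HOROSCOP &mdash;"))
      ["horoscop"] [] (by intro y hy; cases hy)
    simpa using h
  rw [hlast]
  split_ifs <;> rfl

-- B's half-loop over a modular index range produces A's per-article line list
theorem map_modrange {β : Type} (xs : List (Int × String × String)) (F : (Int × String × String) → β)
    (d : Int × String × String) (n a b : Int)
    (hn : n = min (xs.length : Int) 10) (hb : b = a + n) (ha : a = 0 ∨ a = n) :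
    (PySem.List.pyRange a b 1).map (fun i => F (PySem.List.pyGetD xs (PySem.Int.mod i n) d))
      = (xs.take 10).map F := by
  subst hb
  apply List.ext_getElem
  · simp only [List.length_map, PySem.List.length_pyRange_one, List.length_take]
    omega
  · intro k h1 h2
    simp only [List.length_map, PySem.List.length_pyRange_one] at h1
    have hk : (k : Int) < n := by omega
    have hk0 : (0:Int) ≤ k := by positivity
    have hnpos : (0:Int) < n := by omega
    simp only [List.getElem_map]
    rw [PySem.List.getElem_pyRange_one]
    have hmod : PySem.Int.mod (a + (k:Int)) n = (k : Int) := by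
      rw [PySem.Int.mod_eq_emod_of_pos hnpos]
      rcases ha with rfl | rfl
      · rw [zero_add]; exact Int.emod_eq_of_lt hk0 hk
      · rw [Int.add_emod_left]; exact Int.emod_eq_of_lt hk0 hk
    rw [hmod, PySem.List.pyGetD_eq_getElem xs d hk0 (by omega)]
    simp [List.getElem_take]

-- B's line function agrees with A's
theorem map_line_eq (T : List (Int × String × String)) :
    T.map (fun p => "          <a href=\"" ++ p.2.1 ++ "\">" ++ icon_alt p.2.1 ++ " "
        ++ PySem.Str.replace (PySem.Str.replace p.2.2 "&" "&amp;") "\"" "&quot;" ++ "</a>")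
      = T.map (fun p => "          <a href=\"" ++ p.2.1 ++ "\">" ++ get_icon p.2.1 p.2.2 ++ " "
        ++ PySem.Str.replace (PySem.Str.replace p.2.2 "&" "&amp;") "\"" "&quot;" ++ "</a>") := by
  apply List.map_congr_left
  intro p _
  rw [icon_alt_eq p.2.1 p.2.2]

-- ===== VERDICT (by name: the statement is the Claim_ definition above) =====
theorem genereaza_ticker_spec : Claim_equal_genereaza_ticker := by
  intro articole _
  unfold Spec_genereaza_ticker
  simp only [genereaza_ticker, genereaza_ticker_alt,
    PySem.List.foldl_append_singleton_eq_map, List.nil_append]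
  rw [PySem.List.slice_to articole (by norm_num : (0:Int) ≤ 10)]
  simp only [show ((10:Int)).toNat = 10 from rfl]
  set n : Int := min (articole.length : Int) 10 with hn
  have hn0 : (0:Int) ≤ n := by omega
  rw [PySem.List.pyRange_one_append 0 n (2*n) hn0 (by omega), List.map_append]
  have h1 := map_modrange articole
    (fun p => "          <a href=\"" ++ p.2.1 ++ "\">" ++ icon_alt p.2.1 ++ " "
        ++ PySem.Str.replace (PySem.Str.replace p.2.2 "&" "&amp;") "\"" "&quot;" ++ "</a>")
    (0, "", "") n 0 n hn (by omega) (Or.inl rfl)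
  have h2 := map_modrange articole
    (fun p => "          <a href=\"" ++ p.2.1 ++ "\">" ++ icon_alt p.2.1 ++ " "
        ++ PySem.Str.replace (PySem.Str.replace p.2.2 "&" "&amp;") "\"" "&quot;" ++ "</a>")
    (0, "", "") n n (2*n) hn (by omega) (Or.inr rfl)
  simp only [] at h1 h2
  rw [h1, h2, map_line_eq]
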